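-- pv_equiv track=rewrite | github.com/cyless-hj/TIL | Algorithm/Programmers/LV1/대충 만든 자판.py | solution
-- ===== SOURCE A (Python) =====
-- from collections import defaultdict
--
-- def solution(keymap, targets):
--     answer = []
--     dic = defaultdict(int)
--     for arr in keymap:
--         for s in arr:
--             tmp = arr.index(s)
--             if dic[s] == 0 or tmp < dic[s]:
--                 dic[s] = arr.index(s) + 1
--
--     for arr in targets:
--         cnt = 0
--         for s in arr:
--             if dic[s] != 0:
--                 cnt += dic[s]
--             else:
--                 cnt = -1
--                 break
--         answer.append(cnt)
--     return answer
-- ===== SOURCE B (Python) =====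
-- def solution(keymap, targets):
--     # Column-major build: visit position j across ALL rows before position j+1,
--     # so the first write for a character is its minimal 1-based position and
--     # setdefault needs no comparison; scoring materializes the looked-up values
--     # (None for absent) and checks for the None sentinel before summing.
--     pos = {}
--     width = max(map(len, keymap), default=0)
--     for j in range(width):
--         for row in keymap:
--             if j < len(row):
--                 pos.setdefault(row[j], j + 1)
--     answer = []
--     for t in targets:
--         vals = [pos.get(c) for c in t]
--         answer.append(-1 if None in vals else sum(vals))
--     return answer
-- ===== Notes on version B (the rewrite author's own statement) =====
-- stated objective: alternative
-- what changed: B traverses the keymap column-major (position j across all rows before j+1), so the first setdefault write for a character is already its minimal 1-based position and no comparison or .index scan is needed, unlike A's row-major min-update over a defaultdict; scoring materializes the looked-up values per target (None for absent) and checks the None sentinel before summing, instead of A's fused accumulate-with-early-break loop.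
import Mathlib
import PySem

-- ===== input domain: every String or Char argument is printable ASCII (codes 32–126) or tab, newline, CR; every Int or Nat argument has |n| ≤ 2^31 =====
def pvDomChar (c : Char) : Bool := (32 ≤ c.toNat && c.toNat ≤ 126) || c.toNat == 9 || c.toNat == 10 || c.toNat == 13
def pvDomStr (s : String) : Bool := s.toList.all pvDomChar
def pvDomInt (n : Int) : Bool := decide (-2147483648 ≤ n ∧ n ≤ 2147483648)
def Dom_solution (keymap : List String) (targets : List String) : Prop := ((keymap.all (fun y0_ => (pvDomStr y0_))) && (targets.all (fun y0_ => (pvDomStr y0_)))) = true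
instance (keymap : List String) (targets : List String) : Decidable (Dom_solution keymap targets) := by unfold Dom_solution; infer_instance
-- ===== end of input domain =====

-- B builds the position dict column-major (first write wins via setdefault, no comparisons,
-- no inner .index scan) and scores each target by materializing looked-up values and
-- checking for a None sentinel before summing — an alternative decomposition, not claimed faster.


-- ===== PORT A =====
-- arr.index(s): s is always a character of arr here, so index? is some; getD 0 is exact
def pvIdx (row : List Char) (c : Char) : Int :=
  ((PySem.List.index? row c).getD 0 : Nat)

-- body of A's inner keymap loop: tmp = arr.index(s); if dic[s] == 0 or tmp < dic[s]: dic[s] = arr.index(s) + 1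
def pvStepA (row : List Char) (dic : PySem.Dict Char Int) (s : Char) : PySem.Dict Char Int :=
  let tmp := pvIdx row s
  if dic.getD s 0 == 0 || tmp < dic.getD s 0 then dic.insert s (pvIdx row s + 1) else dic

-- A's scoring loop over one target, with the early 'cnt = -1; break'
def pvScoreA (dic : PySem.Dict Char Int) : List Char → Int → Int
  | [], cnt => cnt
  | s :: rest, cnt =>
      if dic.getD s 0 != 0 then pvScoreA dic rest (cnt + dic.getD s 0) else -1

def solution (keymap : List String) (targets : List String) : List Int :=
  let dic := keymap.foldl (fun dic arr => arr.toList.foldl (pvStepA arr.toList) dic) PySem.Dict.empty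
  targets.foldl (fun answer arr => answer ++ [pvScoreA dic arr.toList 0]) []

-- ===== PORT B =====
-- width = max(map(len, keymap), default=0)
def pvWidth (keymap : List String) : Int :=
  PySem.List.maxD (keymap.map (fun r => PySem.Str.len r)) (fun y => y) 0

-- body of B's inner row loop for column j: if j < len(row): pos.setdefault(row[j], j + 1)
-- row[j]: j comes from range(width) and the guard gives 0 ≤ j < len(row), so getD's default is never used — exact.
def pvColStep (j : Int) (pos : PySem.Dict Char Int) (row : String) : PySem.Dict Char Int :=
  if j < PySem.Str.len row then pos.setdefault (row.toList.getD j.toNat ' ') (j + 1) else pos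

-- vals = [pos.get(c) for c in t]; -1 if None in vals else sum(vals)
-- sum(vals): under the guard every element is `some`, so `getD 0` unwraps exactly.
def pvScoreB (pos : PySem.Dict Char Int) (t : String) : Int :=
  let vals := t.toList.map (fun c => pos.get? c)
  if vals.contains none then -1 else (vals.map (fun v => v.getD 0)).sum

def solution_alt (keymap : List String) (targets : List String) : List Int :=
  let pos := (PySem.List.pyRange 0 (pvWidth keymap) 1).foldl
    (fun pos j => keymap.foldl (pvColStep j) pos) PySem.Dict.empty
  targets.foldl (fun answer t => answer ++ [pvScoreB pos t]) []

-- ===== PRECONDITION & SPEC =====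
def Spec_solution (keymap : List String) (targets : List String) (out : List Int) : Prop := out = solution_alt keymap targets
instance (keymap : List String) (targets : List String) (out : List Int) : Decidable (Spec_solution keymap targets out) := by unfold Spec_solution; infer_instance

-- ===== CLAIM (what is proved, stated in full; the proofs are below) =====
def Claim_equal_solution : Prop := ∀ (keymap : List String) (targets : List String), Dom_solution keymap targets → Spec_solution keymap targets (solution keymap targets)

-- ===== LEMMAS AND PROOFS =====

-- the net value update A performs for one character with first index j (1-based min)
def fA (v j : Int) : Int := if v = 0 ∨ j < v then j + 1 else v

-- minimum over the keymap rows of the first index of c (the common spec of both builds)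
def fmin (c : Char) : List String → Option Nat
  | [] => none
  | row :: km =>
      match PySem.List.index? row.toList c, fmin c km with
      | none, a => a
      | some j, none => some j
      | some j, some v => some (min j v)

def mergeA (v : Int) (o : Option Nat) : Int :=
  match o with
  | none => v
  | some j => fA v (j : Int)

-- boolean column-occurrence test: some row has c at column j
def pI (km : List String) (c : Char) (j : Int) : Bool :=
  km.any (fun row => row.toList[j.toNat]? == some c)

theorem stepA_getD (row : List Char) (d : PySem.Dict Char Int) (s c : Char) :
    (pvStepA row d s).getD c 0 =
      if c = s ∧ (d.getD s 0 = 0 ∨ pvIdx row s < d.getD s 0) then pvIdx row s + 1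
      else d.getD c 0 := by
  simp only [pvStepA, beq_iff_eq, Bool.or_eq_true, decide_eq_true_eq]
  split_ifs with h1 h2 h2 <;>
    first
    | rfl
    | (rw [PySem.Dict.getD_insert]; simp_all)
    | simp_all

theorem fA_idem (v j : Int) : fA (fA v j) j = fA v j := by
  simp only [fA]; split_ifs <;> omega

theorem fA_assoc (v : Int) (j w : Nat) (hv : 0 ≤ v) :
    fA (fA v (j : Int)) (w : Int) = fA v ((min j w : Nat) : Int) := by
  simp only [fA, Nat.cast_min]
  split_ifs <;> omega

theorem fA_nonneg (v j : Int) (hv : 0 ≤ v) (hj : 0 ≤ j) : 0 ≤ fA v j := by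
  simp only [fA]; split_ifs <;> omega

-- one row of A's build: the dict value of c becomes fA(old, first index of c in the row)
theorem A_row (row : List Char) :
    ∀ (cs : List Char) (d : PySem.Dict Char Int) (c : Char),
      (cs.foldl (pvStepA row) d).getD c 0 =
        if c ∈ cs then fA (d.getD c 0) (pvIdx row c) else d.getD c 0 := by
  intro cs
  induction cs with
  | nil => intro d c; simp
  | cons a cs ih =>
    intro d c
    rw [List.foldl_cons, ih]
    have hst := stepA_getD row d a c
    by_cases hca : c = a
    · subst hca
      have hfa : (pvStepA row d c).getD c 0 = fA (d.getD c 0) (pvIdx row c) := by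
        rw [hst]; simp only [fA, true_and]
      rw [hfa]
      by_cases hcs : c ∈ cs
      · simp [hcs, fA_idem _ _]
      · simp [hcs]
    · have hne2 : (pvStepA row d a).getD c 0 = d.getD c 0 := by
        rw [hst]; simp [hca]
      rw [hne2]
      by_cases hcs : c ∈ cs <;> simp [hcs, hca]

-- A's whole build, relative to an arbitrary (nonnegative-valued) starting dict
theorem A_build :
    ∀ (km : List String) (d : PySem.Dict Char Int) (c : Char), 0 ≤ d.getD c 0 →
      (km.foldl (fun dic arr => arr.toList.foldl (pvStepA arr.toList) dic) d).getD c 0 =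
        mergeA (d.getD c 0) (fmin c km) := by
  intro km
  induction km with
  | nil => intro d c _; rfl
  | cons row km ih =>
    intro d c hv
    rw [List.foldl_cons]
    have hrow := A_row row.toList row.toList d c
    cases hidx : PySem.List.index? row.toList c with
    | none =>
      have hnm : c ∉ row.toList := (PySem.List.index?_eq_none_iff _ _).mp hidx
      rw [ih _ c (by rwa [hrow, if_neg hnm]), hrow, if_neg hnm]
      simp only [fmin, hidx]
    | some j =>
      have hm : c ∈ row.toList := by
        have := (PySem.List.index?_isSome_iff row.toList c).mp (by rw [hidx]; rfl)
        exact this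
      have hj : pvIdx row.toList c = (j : Int) := by simp only [pvIdx, hidx, Option.getD_some]
      have hval : (row.toList.foldl (pvStepA row.toList) d).getD c 0 = fA (d.getD c 0) (j : Int) := by
        rw [hrow, if_pos hm, hj]
      rw [ih _ c (by rw [hval]; exact fA_nonneg _ _ hv (by positivity)), hval]
      cases hfm : fmin c km with
      | none => simp only [fmin, hidx, hfm, mergeA]
      | some w =>
        simp only [fmin, hidx, hfm, mergeA]
        exact fA_assoc _ j w hv

-- one column of B's build: first-wins setdefault over the rows
theorem B_col (j : Int) (hj : 0 ≤ j) :
    ∀ (rows : List String) (pos : PySem.Dict Char Int) (c : Char),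
      (rows.foldl (pvColStep j) pos).get? c =
        match pos.get? c with
        | some v => some v
        | none => if rows.any (fun row => row.toList[j.toNat]? == some c) then some (j + 1) else none := by
  intro rows
  induction rows with
  | nil => intro pos c; cases h : pos.get? c <;> simp [h]
  | cons row rows ih =>
    intro pos c
    rw [List.foldl_cons]
    by_cases hlen : j < PySem.Str.len row
    · have hjl : j.toNat < row.toList.length := by
        have : j < (row.toList.length : Int) := by simpa using hlen
        omega
      have hgd : row.toList.getD j.toNat ' ' = row.toList[j.toNat] := List.getD_eq_getElem _ _ hjl
      have hge : row.toList[j.toNat]? = some (row.toList[j.toNat]) := List.getElem?_eq_getElem hjl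
      by_cases hca : c = row.toList[j.toNat]
      · rw [pvColStep, if_pos hlen, hgd, ← hca, ih]
        rw [PySem.Dict.get?_setdefault_self]
        cases h : pos.get? c with
        | some v => simp
        | none => simp [List.any_cons, hge, hca]
      · rw [pvColStep, if_pos hlen, hgd, ih,
          PySem.Dict.get?_setdefault_of_ne pos _ hca]
        cases h : pos.get? c with
        | some v => simp
        | none =>
          simp only [List.any_cons, hge]
          have : (some (row.toList[j.toNat]) == some c) = false := by
            simp; exact fun h' => hca h'.symm
          simp [this]
    · have hnone : row.toList[j.toNat]? = none := by
        apply List.getElem?_eq_none_iff.mpr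
        have := PySem.Str.len_eq row  -- Str.len row = row.toList.length
        omega
      rw [pvColStep, if_neg hlen, ih]
      cases h : pos.get? c with
      | some v => simp
      | none => simp [List.any_cons, hnone]

-- B's column loop: the stored value is 1 + the first column in `cols` where c occurs
theorem B_cols (km : List String) (c : Char) :
    ∀ (cols : List Int) (pos : PySem.Dict Char Int), (∀ j ∈ cols, 0 ≤ j) →
      (cols.foldl (fun pos j => km.foldl (pvColStep j) pos) pos).get? c =
        match pos.get? c with
        | some v => some v
        | none => (cols.find? (fun j => pI km c j)).map (fun j => j + 1) := by
  intro cols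
  induction cols with
  | nil => intro pos _; cases h : pos.get? c <;> simp [h]
  | cons j cols ih =>
    intro pos hnn
    have hj : 0 ≤ j := hnn j (List.mem_cons_self)
    rw [List.foldl_cons, ih _ (fun x hx => hnn x (List.mem_cons_of_mem _ hx))]
    have hcol := B_col j hj km pos c
    cases h : pos.get? c with
    | some v => simp only [hcol, h]
    | none =>
      simp only [hcol, h]
      by_cases hp : pI km c j = true
      · simp only [pI] at hp
        simp [pI, hp]
      · have hp' : pI km c j = false := by revert hp; cases pI km c j <;> simp
        simp only [pI] at hp'
        simp [pI, hp']

theorem fmin_cons (c : Char) (row : String) (km : List String) :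
    fmin c (row :: km) =
      match PySem.List.index? row.toList c, fmin c km with
      | none, a => a
      | some j, none => some j
      | some j, some v => some (min j v) := rfl

-- fmin's characterisation: none ↔ c in no row; some m = the least first-index over the rows
theorem fmin_spec (c : Char) :
    ∀ km : List String,
      (fmin c km = none → ∀ row ∈ km, PySem.List.index? row.toList c = none) ∧
      (∀ m, fmin c km = some m →
        (∃ row ∈ km, PySem.List.index? row.toList c = some m) ∧
        (∀ row ∈ km, ∀ j, PySem.List.index? row.toList c = some j → m ≤ j)) := by
  intro km
  induction km with
  | nil => exact ⟨fun _ row hr => absurd hr (List.not_mem_nil), fun m h => by simp [fmin] at h⟩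
  | cons row km ih =>
    obtain ⟨ihn, ihs⟩ := ih
    cases hidx : PySem.List.index? row.toList c with
    | none =>
      constructor
      · intro h r hr
        rcases List.mem_cons.mp hr with rfl | hr'
        · exact hidx
        · exact ihn (by rwa [fmin_cons, hidx] at h) r hr'
      · intro m h
        have hfm : fmin c km = some m := by rwa [fmin_cons, hidx] at h
        obtain ⟨⟨r, hr, hri⟩, hmin⟩ := ihs m hfm
        refine ⟨⟨r, List.mem_cons_of_mem _ hr, hri⟩, ?_⟩
        intro r' hr' j hj
        rcases List.mem_cons.mp hr' with rfl | hr''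
        · rw [hidx] at hj; cases hj
        · exact hmin r' hr'' j hj
    | some j =>
      constructor
      · intro h
        exfalso
        cases hfm : fmin c km <;> rw [fmin_cons, hidx, hfm] at h <;> simp at h
      · intro m h
        cases hfm : fmin c km with
        | none =>
          have hmj : m = j := by
            rw [fmin_cons, hidx, hfm] at h
            have h' : (some j : Option Nat) = some m := h
            injection h' with h2
            omega
          subst hmj
          refine ⟨⟨row, List.mem_cons_self, hidx⟩, ?_⟩
          intro r' hr' j' hj'
          rcases List.mem_cons.mp hr' with rfl | hr''
          · rw [hidx] at hj'
            injection hj' with h2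
            omega
          · rw [ihn hfm r' hr'' ] at hj'; cases hj'
        | some w =>
          have hmw : m = min j w := by
            rw [fmin_cons, hidx, hfm] at h
            have h' : (some (min j w) : Option Nat) = some m := h
            injection h' with h2
            omega
          subst hmw
          obtain ⟨⟨r, hr, hri⟩, hmin⟩ := ihs w hfm
          constructor
          · rcases Nat.le_total j w with hjw | hjw
            · exact ⟨row, List.mem_cons_self, by rw [hidx, Nat.min_eq_left hjw]⟩
            · exact ⟨r, List.mem_cons_of_mem _ hr, by rw [hri, Nat.min_eq_right hjw]⟩
          · intro r' hr' j' hj'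
            rcases List.mem_cons.mp hr' with rfl | hr''
            · rw [hidx] at hj'
              injection hj' with h2
              omega
            · have := hmin r' hr'' j' hj'
              omega

theorem index?_le_of_getElem? (row : List Char) (c : Char) (n : Nat)
    (h : row[n]? = some c) : ∃ j, PySem.List.index? row c = some j ∧ j ≤ n := by
  have hm : c ∈ row := List.mem_of_getElem? h
  obtain ⟨j, hj⟩ := Option.isSome_iff_exists.mp ((PySem.List.index?_isSome_iff _ _).mpr hm)
  obtain ⟨hjl, _, hminj⟩ := PySem.List.getElem_of_index?_eq_some hj
  refine ⟨j, hj, ?_⟩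
  by_contra hgt
  have hn : n < row.length := (List.getElem?_eq_some_iff.mp h).1
  exact hminj n (by omega) (by
    have := (List.getElem?_eq_some_iff.mp h).2
    simpa using this)

theorem pI_of_fmin_none (km : List String) (c : Char) (h : fmin c km = none) :
    ∀ j : Int, pI km c j = false := by
  intro j
  by_contra hne
  have htrue : pI km c j = true := by revert hne; cases pI km c j <;> simp
  simp only [pI, List.any_eq_true, beq_iff_eq] at htrue
  obtain ⟨row, hr, hrow⟩ := htrue
  obtain ⟨j', hj', _⟩ := index?_le_of_getElem? row.toList c j.toNat hrow
  rw [(fmin_spec c km).1 h row hr] at hj'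
  cases hj'

theorem pI_at_min (km : List String) (c : Char) (m : Nat) (h : fmin c km = some m) :
    pI km c (m : Int) = true := by
  obtain ⟨⟨row, hr, hri⟩, _⟩ := (fmin_spec c km).2 m h
  obtain ⟨hml, hget, _⟩ := PySem.List.getElem_of_index?_eq_some hri
  simp only [pI, List.any_eq_true, beq_iff_eq]
  exact ⟨row, hr, by rw [Int.toNat_natCast]; rw [List.getElem?_eq_getElem hml, hget]⟩

theorem pI_below_min (km : List String) (c : Char) (m : Nat) (h : fmin c km = some m) :
    ∀ j : Int, 0 ≤ j → j < (m : Int) → pI km c j = false := by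
  intro j hj0 hjm
  by_contra hne
  have htrue : pI km c j = true := by revert hne; cases pI km c j <;> simp
  simp only [pI, List.any_eq_true, beq_iff_eq] at htrue
  obtain ⟨row, hr, hrow⟩ := htrue
  obtain ⟨j', hj', hle⟩ := index?_le_of_getElem? row.toList c j.toNat hrow
  have := ((fmin_spec c km).2 m h).2 row hr j' hj'
  omega

theorem min_lt_width (km : List String) (c : Char) (m : Nat) (h : fmin c km = some m) :
    (m : Int) < pvWidth km := by
  obtain ⟨⟨row, hr, hri⟩, _⟩ := (fmin_spec c km).2 m h
  obtain ⟨hml, _, _⟩ := PySem.List.getElem_of_index?_eq_some hri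
  have hlen : (row.toList.length : Int) ≤ pvWidth km := by
    unfold pvWidth
    have hmem : PySem.Str.len row ∈ km.map (fun r => PySem.Str.len r) :=
      List.mem_map_of_mem hr
    rcases hk : km.map (fun r => PySem.Str.len r) with _ | ⟨x, t⟩
    · rw [hk] at hmem; cases hmem
    · rw [hk] at hmem
      rw [PySem.List.maxD_id_cons]
      rcases List.mem_cons.mp hmem with rfl | hmem'
      · have := (PySem.List.le_foldl_max t (PySem.Str.len row)).1
        rw [PySem.Str.len_eq] at this ⊢
        exact this
      · have := (PySem.List.le_foldl_max t x).2 _ hmem'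
        rw [PySem.Str.len_eq] at this
        exact this
  omega

-- find? over range(a, b) picks the least column satisfying p
theorem find?_pyRange (p : Int → Bool) :
    ∀ (n : Nat) (a b m : Int), (m - a).toNat = n → a ≤ m → m < b → p m = true →
      (∀ j, a ≤ j → j < m → p j = false) →
      (PySem.List.pyRange a b 1).find? p = some m := by
  intro n
  induction n with
  | zero =>
    intro a b m hn ham hmb hp _
    have : a = m := by omega
    subst this
    rw [PySem.List.pyRange_one_cons hmb, List.find?_cons, hp]
  | succ n ih =>
    intro a b m hn ham hmb hp hbelow
    have ham' : a < m := by omega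
    rw [PySem.List.pyRange_one_cons (by omega), List.find?_cons, hbelow a (le_refl a) ham']
    exact ih (a + 1) b m (by omega) (by omega) hmb hp (fun j h1 h2 => hbelow j (by omega) h2)

-- the value of A's finished dict
theorem A_val (km : List String) (c : Char) :
    (km.foldl (fun dic arr => arr.toList.foldl (pvStepA arr.toList) dic) PySem.Dict.empty).getD c 0 =
      mergeA 0 (fmin c km) := by
  rw [A_build km PySem.Dict.empty c (by rw [PySem.Dict.getD_empty]), PySem.Dict.getD_empty]

-- the value of B's finished dict
theorem B_val (km : List String) (c : Char) :
    ((PySem.List.pyRange 0 (pvWidth km) 1).foldl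
        (fun pos j => km.foldl (pvColStep j) pos) PySem.Dict.empty).get? c =
      (fmin c km).map (fun n => (n : Int) + 1) := by
  rw [B_cols km c _ PySem.Dict.empty
    (fun j hj => ((PySem.List.mem_pyRange_one).mp hj).1), PySem.Dict.get?_empty]
  cases hfm : fmin c km with
  | none =>
    rw [List.find?_eq_none.mpr (fun j _ => by simp [pI_of_fmin_none km c hfm j])]
    simp
  | some m =>
    rw [find?_pyRange (fun j => pI km c j) (m : Nat) 0 (pvWidth km) (m : Int) (by omega)
      (by omega) (min_lt_width km c m hfm) (pI_at_min km c m hfm)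
      (fun j h1 h2 => pI_below_min km c m hfm j h1 h2)]
    rfl

-- A's fused scoring loop equals B's sentinel-then-sum decomposition
theorem score_eq (dic pos : PySem.Dict Char Int) (km : List String)
    (hA : ∀ c, dic.getD c 0 = mergeA 0 (fmin c km))
    (hB : ∀ c, pos.get? c = (fmin c km).map (fun n => (n : Int) + 1)) :
    ∀ (cs : List Char) (acc : Int),
      pvScoreA dic cs acc =
        if (cs.map (fun c => pos.get? c)).contains none then -1
        else acc + ((cs.map (fun c => pos.get? c)).map (fun v => v.getD 0)).sum := by
  intro cs
  induction cs with
  | nil => intro acc; simp [pvScoreA]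
  | cons c cs ih =>
    intro acc
    cases hfm : fmin c km with
    | none =>
      have hv : dic.getD c 0 = 0 := by rw [hA c, hfm]; rfl
      have hg : pos.get? c = none := by rw [hB c, hfm]; rfl
      simp [pvScoreA, hv, hg]
    | some n =>
      have hv : dic.getD c 0 = (n : Int) + 1 := by rw [hA c, hfm]; simp [mergeA, fA]
      have hg : pos.get? c = some ((n : Int) + 1) := by rw [hB c, hfm]; rfl
      have hne : dic.getD c 0 ≠ 0 := by rw [hv]; omega
      rw [pvScoreA, if_pos (by simpa using hne), ih]
      simp only [List.map_cons, List.contains_cons, hg, List.sum_cons]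
      have : ((none : Option Int) == some ((n : Int) + 1)) = false := by rfl
      rw [this, Bool.false_or]
      split_ifs with h
      · rfl
      · simp only [Option.getD_some, hv]
        omega

-- ===== VERDICT (by name: the statement is the Claim_ definition above) =====
theorem solution_spec : Claim_equal_solution := by
  intro keymap targets _
  unfold Spec_solution solution solution_alt
  rw [PySem.List.foldl_append_singleton_eq_map, PySem.List.foldl_append_singleton_eq_map]
  refine congrArg _ (List.map_congr_left ?_)
  intro t _
  rw [score_eq _ _ keymap (A_val keymap) (B_val keymap) t.toList 0]
  simp [pvScoreB]
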